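-- pv_equiv track=rewrite | github.com/gyhzz/UCSD_Algorithms | w1_pairwise.py | correct_sol_fast
-- ===== SOURCE A (Python) =====
-- def correct_sol_fast(int_list):
--
--     big1 = 0
--     big2 = 0
--     big1_index = 0
--
--     for i in range(len(int_list)):
--         if int_list[i] > big1:
--             big1 = int_list[i]
--             big1_index = i
--
--     for j in range(len(int_list)):
--         if int_list[j] > big2 and j != big1_index:
--             big2 = int_list[j]
--
--     return big1 * big2
-- ===== SOURCE B (Python) =====
-- def correct_sol_fast(int_list):
--     top = sorted(int_list + [0, 0], reverse=True)
--     return top[0] * top[1]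
-- ===== Notes on version B (the rewrite author's own statement) =====
-- stated objective: idiomatic
-- what changed: Replaces A's two index-scanning passes (max then max-excluding-the-max's-index) by sorting the list padded with two zeros in descending order and multiplying its first two entries.
import Mathlib
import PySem

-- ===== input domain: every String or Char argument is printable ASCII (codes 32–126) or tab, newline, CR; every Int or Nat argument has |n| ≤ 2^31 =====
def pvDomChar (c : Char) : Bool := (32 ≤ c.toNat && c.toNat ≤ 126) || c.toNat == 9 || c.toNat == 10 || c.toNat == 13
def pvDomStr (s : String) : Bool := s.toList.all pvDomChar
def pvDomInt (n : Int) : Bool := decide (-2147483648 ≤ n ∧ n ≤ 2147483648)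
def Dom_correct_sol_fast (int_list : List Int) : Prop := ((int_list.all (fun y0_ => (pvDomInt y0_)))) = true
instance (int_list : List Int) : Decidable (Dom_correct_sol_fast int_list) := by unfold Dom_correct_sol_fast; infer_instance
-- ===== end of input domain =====

-- B replaces A's two index-scanning passes by sorting the list padded with two zeros in
-- descending order and multiplying its first two entries (objective: simpler/idiomatic).

-- ===== PORT A =====
def correct_sol_fast (int_list : List Int) : Int :=
  -- big1 = 0; big2 = 0; big1_index = 0; first loop computes (big1, big1_index)
  let p1 : Int × Int :=
    (PySem.List.pyRange 0 (PySem.List.len int_list) 1).foldl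
      (fun (st : Int × Int) i =>
        if PySem.List.pyGetD int_list i 0 > st.1 then (PySem.List.pyGetD int_list i 0, i) else st)
      ((0 : Int), (0 : Int))
  -- second loop computes big2 (indices i of range(len) are in range, so pyGetD is exact)
  let big2 : Int :=
    (PySem.List.pyRange 0 (PySem.List.len int_list) 1).foldl
      (fun (b2 : Int) j =>
        if PySem.List.pyGetD int_list j 0 > b2 ∧ j ≠ p1.2 then PySem.List.pyGetD int_list j 0 else b2)
      (0 : Int)
  p1.1 * big2

-- ===== PORT B =====
def correct_sol_fast_alt (int_list : List Int) : Int :=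
  -- top = sorted(int_list + [0, 0], reverse=True); return top[0] * top[1]
  -- (the list has length ≥ 2, so the second match arm is unreachable)
  match PySem.List.sorted (int_list ++ [0, 0]) id true with
  | a :: b :: _ => a * b
  | _ => 0

-- ===== PRECONDITION & SPEC =====
def Spec_correct_sol_fast (int_list : List Int) (out : Int) : Prop := out = correct_sol_fast_alt int_list
instance (int_list : List Int) (out : Int) : Decidable (Spec_correct_sol_fast int_list out) := by unfold Spec_correct_sol_fast; infer_instance

-- ===== CLAIM (what is proved, stated in full; the proofs are below) =====
def Claim_equal_correct_sol_fast : Prop := ∀ (int_list : List Int), Dom_correct_sol_fast int_list → Spec_correct_sol_fast int_list (correct_sol_fast int_list)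

-- ===== LEMMAS AND PROOFS =====

-- the body of A's first loop, over enumerated (index, value) pairs
def pass1f (st : Int × Int) (p : Int × Int) : Int × Int :=
  if p.2 > st.1 then (p.2, p.1) else st

-- the body of A's second loop (t = big1_index), over enumerated pairs
def pass2f (t : Int) (b : Int) (p : Int × Int) : Int :=
  if p.2 > b ∧ p.1 ≠ t then p.2 else b

theorem foldr_max_swap (a b : Int) (xs : List Int) :
    xs.foldr max (max a b) = max a (xs.foldr max b) := by
  induction xs with
  | nil => rfl
  | cons x xs ih => simp [ih, max_left_comm]

theorem le_foldr_init (b : Int) (xs : List Int) : b ≤ xs.foldr max b := by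
  induction xs with
  | nil => simp
  | cons x xs ih => exact le_trans ih (le_max_right _ _)

theorem le_foldr_mem {x : Int} (b : Int) {xs : List Int} (hx : x ∈ xs) :
    x ≤ xs.foldr max b := by
  induction xs with
  | nil => cases hx
  | cons y ys ih =>
    rcases List.mem_cons.mp hx with h | h
    · subst h; exact le_max_left _ _
    · exact le_trans (ih h) (le_max_right _ _)

theorem foldr_le {a b : Int} {xs : List Int} (hb : b ≤ a) (h : ∀ x ∈ xs, x ≤ a) :
    xs.foldr max b ≤ a := by
  induction xs with
  | nil => simpa using hb
  | cons y ys ih =>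
    simp only [List.foldr_cons]
    exact max_le (h y (by simp)) (ih (fun x hx => h x (by simp [hx])))

theorem foldr_max_perm {xs ys : List Int} (h : xs.Perm ys) (b : Int) :
    xs.foldr max b = ys.foldr max b := by
  induction h with
  | nil => rfl
  | cons x _ ih => simp [ih]
  | swap x y l => simp [max_left_comm]
  | trans _ _ ih1 ih2 => rw [ih1, ih2]

theorem foldr_max_mem_or (xs : List Int) :
    xs.foldr max 0 = 0 ∨ xs.foldr max 0 ∈ xs := by
  induction xs with
  | nil => exact Or.inl rfl
  | cons x ys ih =>
    simp only [List.foldr_cons]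
    rcases max_choice x (ys.foldr max 0) with h | h
    · exact Or.inr (by rw [h]; simp)
    · rcases ih with h0 | hm
      · exact Or.inl (by rw [h, h0])
      · exact Or.inr (by rw [h]; simp [hm])

-- A's first loop, rewritten over enumerate
theorem pass1_eq (l : List Int) :
    (PySem.List.pyRange 0 (PySem.List.len l) 1).foldl
      (fun (st : Int × Int) i =>
        if PySem.List.pyGetD l i 0 > st.1 then (PySem.List.pyGetD l i 0, i) else st)
      ((0 : Int), (0 : Int))
    = (PySem.List.enumerate l 0).foldl pass1f (0, 0) := by
  rw [PySem.List.enumerate_eq_map_pyRange l 0, List.foldl_map]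
  rfl

theorem pass2_eq (l : List Int) (t : Int) :
    (PySem.List.pyRange 0 (PySem.List.len l) 1).foldl
      (fun (b2 : Int) j =>
        if PySem.List.pyGetD l j 0 > b2 ∧ j ≠ t then PySem.List.pyGetD l j 0 else b2)
      (0 : Int)
    = (PySem.List.enumerate l 0).foldl (pass2f t) 0 := by
  rw [PySem.List.enumerate_eq_map_pyRange l 0, List.foldl_map]
  rfl

-- invariant of A's first loop: result value is the running maximum, and unless the state
-- never changed, the result index holds an element equal to the result value
theorem pass1_spec (xs : List Int) : ∀ (s b i : Int),
    ((PySem.List.enumerate xs s).foldl pass1f (b, i)).1 = xs.foldr max b ∧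
    (((PySem.List.enumerate xs s).foldl pass1f (b, i)) = (b, i) ∨
     ∃ (k : Nat) (_ : k < xs.length),
       ((PySem.List.enumerate xs s).foldl pass1f (b, i)).2 = s + k ∧
       xs[k]! = ((PySem.List.enumerate xs s).foldl pass1f (b, i)).1) := by
  induction xs with
  | nil => intro s b i; exact ⟨rfl, Or.inl rfl⟩
  | cons x ys ih =>
    intro s b i
    simp only [PySem.List.enumerate_cons, List.foldl_cons]
    by_cases hx : x > b
    · have hstep : pass1f (b, i) (s, x) = (x, s) := by simp [pass1f, hx]
      rw [hstep]
      obtain ⟨h1, h2⟩ := ih (s + 1) x s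
      constructor
      · rw [h1, List.foldr_cons, show x = max x b from (max_eq_left hx.le).symm,
          foldr_max_swap]
        simp [max_eq_left hx.le]
      · rcases h2 with heq | ⟨k, hk, ha, hb⟩
        · refine Or.inr ⟨0, by simp, ?_, ?_⟩
          · rw [heq]; simp
          · rw [heq]; simp
        · refine Or.inr ⟨k + 1, by simpa using hk, ?_, ?_⟩
          · rw [ha]; push_cast; ring
          · simpa [List.getElem!_cons_succ] using hb
    · have hstep : pass1f (b, i) (s, x) = (b, i) := by simp [pass1f, hx]
      rw [hstep]
      obtain ⟨h1, h2⟩ := ih (s + 1) b i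
      constructor
      · rw [h1, List.foldr_cons,
          max_eq_right (le_trans (not_lt.mp hx) (le_foldr_init b ys))]
      · rcases h2 with heq | ⟨k, hk, ha, hb⟩
        · exact Or.inl heq
        · refine Or.inr ⟨k + 1, by simpa using hk, ?_, ?_⟩
          · rw [ha]; push_cast; ring
          · simpa [List.getElem!_cons_succ] using hb

-- A's second loop when the excluded index lies strictly left of the scanned range:
-- it is a plain running maximum
theorem pass2_out (xs : List Int) : ∀ (s b t : Int), t < s →
    (PySem.List.enumerate xs s).foldl (pass2f t) b = xs.foldr max b := by
  induction xs with
  | nil => intro s b t _; rfl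
  | cons x ys ih =>
    intro s b t ht
    simp only [PySem.List.enumerate_cons, List.foldl_cons]
    have hstep : pass2f t b (s, x) = max x b := by
      simp only [pass2f]
      split_ifs with h <;> omega
    rw [hstep, ih (s + 1) (max x b) t (by omega), foldr_max_swap, List.foldr_cons]

-- A's second loop with the excluded index inside the range: the running maximum of the
-- list with that position removed
theorem pass2_in (xs : List Int) : ∀ (s b : Int) (k : Nat), k < xs.length →
    (PySem.List.enumerate xs s).foldl (pass2f (s + k)) b = (xs.eraseIdx k).foldr max b := by
  induction xs with
  | nil => intro s b k hk; simp at hk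
  | cons x ys ih =>
    intro s b k hk
    simp only [PySem.List.enumerate_cons, List.foldl_cons]
    cases k with
    | zero =>
      have hstep : pass2f (s + ((0 : Nat) : Int)) b (s, x) = b := by
        simp [pass2f]
      rw [hstep]
      have := pass2_out ys (s + 1) b (s + ((0 : Nat) : Int)) (by push_cast; omega)
      rw [this]
      simp
    | succ k =>
      have hstep : pass2f (s + ((k + 1 : Nat) : Int)) b (s, x) = max x b := by
        simp only [pass2f]
        split_ifs with h <;> omega
      rw [hstep]
      have harg : s + ((k + 1 : Nat) : Int) = (s + 1) + (k : Int) := by push_cast; ring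
      rw [harg, ih (s + 1) (max x b) k (by simpa using hk), List.eraseIdx_cons_succ,
        List.foldr_cons, ← foldr_max_swap]

-- characterisation of B's sorted list: head = clamped maximum, second entry bounds and is
-- a member of the rest, which is a permutation of the padded list minus the head
theorem B_characterize (l : List Int) :
    ∃ a b rest, PySem.List.sorted (l ++ [0, 0]) id true = a :: b :: rest ∧
      a = l.foldr max 0 ∧ 0 ≤ b ∧
      (∀ x ∈ b :: rest, x ≤ b) ∧ (b :: rest).Perm ((l ++ [0, 0]).erase a) := by
  have hlen : (PySem.List.sorted (l ++ [0, 0]) id true).length = l.length + 2 := by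
    rw [PySem.List.length_sorted]; simp
  have hperm := PySem.List.sorted_perm (l ++ [0, 0]) id true
  have hpw := PySem.List.sorted_pairwise_rev (l ++ [0, 0]) id
  obtain ⟨a, b, rest, hS⟩ :
      ∃ a b rest, PySem.List.sorted (l ++ [0, 0]) id true = a :: b :: rest := by
    rcases h : PySem.List.sorted (l ++ [0, 0]) id true with _ | ⟨a, _ | ⟨b, rest⟩⟩
    · rw [h] at hlen; simp at hlen
    · rw [h] at hlen; simp at hlen
    · exact ⟨a, b, rest, rfl⟩
  rw [hS] at hperm hpw
  have hpc := List.pairwise_cons.mp hpw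
  have ha2 : ∀ x ∈ b :: rest, x ≤ a := fun x hx => hpc.1 x hx
  have hb2 : ∀ x ∈ b :: rest, x ≤ b := by
    intro x hx
    rcases List.mem_cons.mp hx with h | h
    · exact le_of_eq h
    · exact (List.pairwise_cons.mp hpc.2).1 x h
  have ha_mem : a ∈ l ++ [0, 0] := hperm.subset (by simp)
  have h0a : (0 : Int) ≤ a := by
    have h0 : (0 : Int) ∈ a :: b :: rest := hperm.symm.subset (by simp)
    rcases List.mem_cons.mp h0 with h | h
    · exact le_of_eq h
    · exact le_trans (by omega : (0:Int) ≤ 0) (ha2 0 h)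
  have ha_all : ∀ x ∈ l ++ [0, 0], x ≤ a := by
    intro x hx
    have hxS : x ∈ a :: b :: rest := hperm.symm.subset hx
    rcases List.mem_cons.mp hxS with h | h
    · exact le_of_eq h
    · exact ha2 x h
  have ha : a = l.foldr max 0 := by
    have h1 : a ≤ (l ++ [0, 0]).foldr max 0 := le_foldr_mem 0 ha_mem
    have h2 : (l ++ [0, 0]).foldr max 0 ≤ a := foldr_le h0a ha_all
    have h3 : (l ++ [0, 0]).foldr max 0 = l.foldr max 0 := by
      rw [List.foldr_append]; simp
    omega
  have hbperm : (b :: rest).Perm ((l ++ [0, 0]).erase a) :=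
    List.Perm.cons_inv (hperm.trans (List.perm_cons_erase ha_mem))
  have h0e : (0 : Int) ∈ (l ++ [0, 0]).erase a := by
    by_cases hal : a ∈ l
    · rw [List.erase_append_left _ hal]; simp
    · have ha0 : a = 0 := by
        rcases List.mem_append.mp ha_mem with h | h
        · exact absurd h hal
        · simpa using h
      rw [List.erase_append_right _ hal, ha0]
      simp
  have h0b : (0 : Int) ≤ b := hb2 0 (hbperm.symm.subset h0e)
  exact ⟨a, b, rest, hS, ha, h0b, hb2, hbperm⟩

-- ===== VERDICT (by name: the statement is the Claim_ definition above) =====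
theorem correct_sol_fast_spec : Claim_equal_correct_sol_fast := by
  intro l _
  unfold Spec_correct_sol_fast
  obtain ⟨a, b, rest, hS, ha, h0b, hb2, hbperm⟩ := B_characterize l
  have hB : correct_sol_fast_alt l = a * b := by
    unfold correct_sol_fast_alt
    rw [hS]
  simp only [correct_sol_fast, pass1_eq, pass2_eq]
  obtain ⟨h1, h2⟩ := pass1_spec l 0 0 0
  set res := (PySem.List.enumerate l 0).foldl pass1f (0, 0) with hres
  by_cases hM : l.foldr max 0 = 0
  · -- maximum clamps to 0: both products are 0
    have : res.1 = 0 := by rw [h1, hM]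
    rw [hB, ha, hM, this]
    ring
  · have hMpos : 0 < l.foldr max 0 := lt_of_le_of_ne (le_foldr_init 0 l) (Ne.symm hM)
    rcases h2 with heq | ⟨k, hk, hka, hkb⟩
    · exfalso
      apply hM
      rw [← h1, heq]
    · -- res.2 = k points at an occurrence of the maximum
      have hMl : l.foldr max 0 ∈ l := by
        rcases foldr_max_mem_or l with h | h
        · exact absurd h hM
        · exact h
      have hlk : l[k]! = l.foldr max 0 := by rw [hkb, h1]
      have hlk' : l[k] = l.foldr max 0 := by
        rwa [List.getElem!_eq_getElem?_getD, List.getElem?_eq_getElem hk, Option.getD_some] at hlk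
      have hres2 : res.2 = (0 : Int) + (k : Int) := hka
      rw [hres2, pass2_in l 0 0 k hk]
      -- the erased-by-index list is a permutation of the erased-by-value list
      have hsplit : l = l.take k ++ l[k] :: l.drop (k + 1) := by
        conv_lhs => rw [← List.take_append_drop k l]
        rw [List.getElem_cons_drop]
      have hp1 : l.Perm (l[k] :: l.eraseIdx k) := by
        rw [List.eraseIdx_eq_take_drop_succ]
        conv_lhs => rw [hsplit]
        exact List.perm_middle
      have hp2 : l.Perm (l.foldr max 0 :: l.erase (l.foldr max 0)) :=
        List.perm_cons_erase hMl
      rw [hlk'] at hp1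
      have hp3 : (l.eraseIdx k).Perm (l.erase (l.foldr max 0)) :=
        List.Perm.cons_inv (hp1.symm.trans hp2)
      -- b is the clamped maximum of the list minus one occurrence of the maximum
      have he : (l ++ [0, 0]).erase a = l.erase (l.foldr max 0) ++ [0, 0] := by
        rw [ha]; exact List.erase_append_left _ hMl
      have hbv : b = (l.erase (l.foldr max 0)).foldr max 0 := by
        have hbm : b ∈ l.erase (l.foldr max 0) ++ [0, 0] := by
          rw [← he]; exact hbperm.subset (by simp)
        have hfold : (l.erase (l.foldr max 0) ++ [0, 0]).foldr max 0
            = (l.erase (l.foldr max 0)).foldr max 0 := by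
          rw [List.foldr_append]; simp
        have hle : b ≤ (l.erase (l.foldr max 0)).foldr max 0 := by
          rw [← hfold]; exact le_foldr_mem 0 hbm
        have hge : (l.erase (l.foldr max 0)).foldr max 0 ≤ b := by
          rw [← hfold]
          refine foldr_le h0b ?_
          intro x hx
          exact hb2 x (hbperm.symm.subset (he ▸ hx))
        omega
      rw [hB, h1, ha, hbv, foldr_max_perm hp3]
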